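-- pv_equiv track=rewrite | github.com/PhooPyae/data_structure_and_algorithms | Pyraminds.py | pyramind
-- ===== SOURCE A (Python) =====
-- import math
--
-- def pyramind(size):
--     columns = size + (size-1)
--     mid = math.floor(columns/2)
--     stair = ''
--     for row in range(size):
--         for column in range(columns):
--             if column == mid or mid - row <= column <= mid + row :
--             # if mid - row <= column and mid + row >= column:
--                 stair = stair + '#'
--             else:
--                 stair = stair + 's'
--         stair = stair + '\n'
--     return stair
-- ===== SOURCE B (Python) =====
-- def pyramind(size):
--     return ''.join(
--         's' * (size - 1 - r) + '#' * (2 * r + 1) + 's' * (size - 1 - r) + '\n'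
--         for r in range(size)
--     )
-- ===== Notes on version B (the rewrite author's own statement) =====
-- stated objective: simpler
-- what changed: Each row is emitted directly as 's'*(size-1-r) + '#'*(2r+1) + 's'*(size-1-r) + '\n' and the rows are ''.join-ed, eliminating A's inner per-column loop with its membership test, the floor-division midpoint, and A's repeated one-character string concatenation.
import Mathlib
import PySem

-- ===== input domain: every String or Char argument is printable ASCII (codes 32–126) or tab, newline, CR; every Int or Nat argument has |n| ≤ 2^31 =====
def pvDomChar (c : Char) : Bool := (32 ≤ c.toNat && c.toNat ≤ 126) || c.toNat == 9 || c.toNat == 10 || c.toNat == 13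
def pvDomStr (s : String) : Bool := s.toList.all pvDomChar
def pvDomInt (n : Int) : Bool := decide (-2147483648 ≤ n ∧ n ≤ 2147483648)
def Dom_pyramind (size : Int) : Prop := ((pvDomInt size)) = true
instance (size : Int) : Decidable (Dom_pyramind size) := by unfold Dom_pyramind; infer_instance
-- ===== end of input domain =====

-- B builds each row directly as 's'-padding ++ '#'-block ++ 's'-padding ++ newline and joins the rows,
-- removing A's inner per-column loop and membership test (objective: simpler).

-- ===== PORT A =====
-- Strings are built as List Char (PySem convention) and packed with String.mk at the end.
def pyramind (size : Int) : String :=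
  let columns := size + (size - 1)
  let mid := PySem.Int.floordiv columns 2
  let stair : List Char :=
    (PySem.List.pyRange 0 size 1).foldl (fun stair row =>
      ((PySem.List.pyRange 0 columns 1).foldl (fun st column =>
        if column = mid ∨ (mid - row ≤ column ∧ column ≤ mid + row) then st ++ ['#'] else st ++ ['s'])
        stair) ++ ['\n']) []
  String.mk stair

-- ===== PORT B =====
-- One row of B: 's'*(size-1-r) + '#'*(2r+1) + 's'*(size-1-r) + '\n'  (Python's negative repeat = empty ↔ toNat)
def pyramindAltRow (size r : Int) : List Char :=
  List.replicate (size - 1 - r).toNat 's' ++ List.replicate (2 * r + 1).toNat '#' ++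
  List.replicate (size - 1 - r).toNat 's' ++ ['\n']

def pyramind_alt (size : Int) : String :=
  String.mk (((PySem.List.pyRange 0 size 1).map (pyramindAltRow size)).flatten)

-- ===== PRECONDITION & SPEC =====
def Spec_pyramind (size : Int) (out : String) : Prop := out = pyramind_alt size
instance (size : Int) (out : String) : Decidable (Spec_pyramind size out) := by unfold Spec_pyramind; infer_instance

-- ===== CLAIM (what is proved, stated in full; the proofs are below) =====
def Claim_equal_pyramind : Prop := ∀ (size : Int), Dom_pyramind size → Spec_pyramind size (pyramind size)

-- ===== LEMMAS AND PROOFS =====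

-- a range on which f is constant maps to a replicate
lemma map_pyRange_const {α : Type} (f : Int → α) (a b : Int) (v : α)
    (h : ∀ x, a ≤ x → x < b → f x = v) :
    (PySem.List.pyRange a b 1).map f = List.replicate (b - a).toNat v := by
  rw [List.eq_replicate_iff]
  constructor
  · simp [PySem.List.length_pyRange_one]
  · intro y hy
    obtain ⟨x, hx, rfl⟩ := List.mem_map.1 hy
    rw [PySem.List.mem_pyRange_one] at hx
    exact h x hx.1 hx.2

-- A's row r (for 0 ≤ r < size) equals B's row
lemma rowA_eq_rowB (size r : Int) (h0 : 0 ≤ r) (hr : r < size) :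
    (PySem.List.pyRange 0 (size + (size - 1)) 1).map
      (fun column =>
        if column = PySem.Int.floordiv (size + (size - 1)) 2 ∨
           (PySem.Int.floordiv (size + (size - 1)) 2 - r ≤ column ∧
            column ≤ PySem.Int.floordiv (size + (size - 1)) 2 + r)
        then '#' else 's') ++ ['\n'] = pyramindAltRow size r := by
  have hmid : PySem.Int.floordiv (size + (size - 1)) 2 = size - 1 := by
    rw [PySem.Int.floordiv_eq_iff_of_pos (by omega)]
    omega
  rw [hmid]
  have hsplit1 : PySem.List.pyRange 0 (size + (size - 1)) 1 =
      PySem.List.pyRange 0 (size - 1 - r) 1 ++ PySem.List.pyRange (size - 1 - r) (size + (size - 1)) 1 :=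
    PySem.List.pyRange_one_append _ _ _ (by omega) (by omega)
  have hsplit2 : PySem.List.pyRange (size - 1 - r) (size + (size - 1)) 1 =
      PySem.List.pyRange (size - 1 - r) (size - 1 + r + 1) 1 ++
      PySem.List.pyRange (size - 1 + r + 1) (size + (size - 1)) 1 :=
    PySem.List.pyRange_one_append _ _ _ (by omega) (by omega)
  rw [hsplit1, hsplit2, List.map_append, List.map_append]
  rw [map_pyRange_const _ _ _ 's' (fun x hx1 hx2 => by
        have : ¬ (x = size - 1 ∨ (size - 1 - r ≤ x ∧ x ≤ size - 1 + r)) := by omega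
        rw [if_neg this]),
      map_pyRange_const _ _ _ '#' (fun x hx1 hx2 => by
        have : x = size - 1 ∨ (size - 1 - r ≤ x ∧ x ≤ size - 1 + r) := by omega
        rw [if_pos this]),
      map_pyRange_const _ _ _ 's' (fun x hx1 hx2 => by
        have : ¬ (x = size - 1 ∨ (size - 1 - r ≤ x ∧ x ≤ size - 1 + r)) := by omega
        rw [if_neg this])]
  unfold pyramindAltRow
  have e1 : (size - 1 - r - 0).toNat = (size - 1 - r).toNat := by omega
  have e2 : (size - 1 + r + 1 - (size - 1 - r)).toNat = (2 * r + 1).toNat := by omega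
  have e3 : (size + (size - 1) - (size - 1 + r + 1)).toNat = (size - 1 - r).toNat := by omega
  rw [e1, e2, e3]
  simp [List.append_assoc]

-- ===== VERDICT (by name: the statement is the Claim_ definition above) =====
theorem pyramind_spec : Claim_equal_pyramind := by
  intro size _
  show pyramind size = pyramind_alt size
  unfold pyramind pyramind_alt
  simp only []
  congr 1
  have inner : ∀ (row : Int) (acc : List Char),
      ((PySem.List.pyRange 0 (size + (size - 1)) 1).foldl (fun st column =>
        if column = PySem.Int.floordiv (size + (size - 1)) 2 ∨
           (PySem.Int.floordiv (size + (size - 1)) 2 - row ≤ column ∧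
            column ≤ PySem.Int.floordiv (size + (size - 1)) 2 + row)
        then st ++ ['#'] else st ++ ['s']) acc) =
      acc ++ (PySem.List.pyRange 0 (size + (size - 1)) 1).map
        (fun column =>
          if column = PySem.Int.floordiv (size + (size - 1)) 2 ∨
             (PySem.Int.floordiv (size + (size - 1)) 2 - row ≤ column ∧
              column ≤ PySem.Int.floordiv (size + (size - 1)) 2 + row)
          then '#' else 's') := by
    intro row acc
    have := PySem.List.foldl_append_singleton_eq_map
      (fun column =>
        if column = PySem.Int.floordiv (size + (size - 1)) 2 ∨
           (PySem.Int.floordiv (size + (size - 1)) 2 - row ≤ column ∧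
            column ≤ PySem.Int.floordiv (size + (size - 1)) 2 + row)
        then '#' else 's')
      (PySem.List.pyRange 0 (size + (size - 1)) 1) acc
    rw [← this]
    congr 1
    funext st column
    split_ifs <;> rfl
  calc (PySem.List.pyRange 0 size 1).foldl (fun stair row =>
        ((PySem.List.pyRange 0 (size + (size - 1)) 1).foldl (fun st column =>
          if column = PySem.Int.floordiv (size + (size - 1)) 2 ∨
             (PySem.Int.floordiv (size + (size - 1)) 2 - row ≤ column ∧
              column ≤ PySem.Int.floordiv (size + (size - 1)) 2 + row)
          then st ++ ['#'] else st ++ ['s']) stair) ++ ['\n']) []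
      = (PySem.List.pyRange 0 size 1).foldl (fun stair row => stair ++ pyramindAltRow size row) [] := by
        apply PySem.List.foldl_congr_mem
        intro acc row hrow
        rw [PySem.List.mem_pyRange_one] at hrow
        rw [inner row acc, List.append_assoc]
        congr 1
        exact rowA_eq_rowB size row hrow.1 hrow.2
    _ = ((PySem.List.pyRange 0 size 1).map (pyramindAltRow size)).flatten := by
        rw [PySem.List.foldl_append_eq_flatMap, List.nil_append, List.flatMap_def]
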